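-- pv_equiv track=rewrite | github.com/popgenomics/deepDILS | scripts/dev/msmscalc_onePop_sort_haplo.py | comp_differences
-- ===== SOURCE A (Python) =====
-- def comp_differences(alignement, nSegSites):
-- 	n = len(alignement) # number of individuals in the alignement
-- 	res = {}
-- 	res["kxy_allSNP"] = [] # vector containing pi for different SNPs, the probability to sample 2 different alleles
-- 	res["kxy_singletons"] = [] # vector containing pi for different SNPs for singletons only
-- 	for i in range(nSegSites):
-- 		n0 = 0
-- 		n1 = 0
-- 		for j in alignement:
-- 			if j[i] == '0':
-- 				n0 += 1
-- 			if j[i] == '1':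
-- 				n1 += 1
-- 		pi = n0*n1
-- 		res["kxy_allSNP"].append(pi)
-- 		if n0==1 or n1==1: # if only one derived allele or one ancestral allele
-- 			res["kxy_singletons"].append(pi)
-- 	return(res)
-- ===== SOURCE B (Python) =====
-- def comp_differences(alignement, nSegSites):
-- 	# Pairwise-differences algorithm: pi for a SNP is the literal number of
-- 	# unordered haplotype pairs carrying different alleles at that site, and a
-- 	# site is a singleton iff it shows a '0' (resp. '1') but no pair of equal
-- 	# '0's (resp. '1's).
-- 	kxy_allSNP = []
-- 	kxy_singletons = []
-- 	for i in range(nSegSites):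
-- 		chars = [row[i] for row in alignement]
-- 		pi = 0
-- 		pair00 = False
-- 		pair11 = False
-- 		rest = chars
-- 		while rest:
-- 			a = rest[0]
-- 			rest = rest[1:]
-- 			for b in rest:
-- 				if (a == '0' and b == '1') or (a == '1' and b == '0'):
-- 					pi += 1
-- 				elif a == '0' and b == '0':
-- 					pair00 = True
-- 				elif a == '1' and b == '1':
-- 					pair11 = True
-- 		kxy_allSNP.append(pi)
-- 		if ('0' in chars and not pair00) or ('1' in chars and not pair11):
-- 			kxy_singletons.append(pi)
-- 	return {"kxy_allSNP": kxy_allSNP, "kxy_singletons": kxy_singletons}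
-- ===== Notes on version B (the rewrite author's own statement) =====
-- stated objective: alternative
-- what changed: Replaced A's per-SNP allele counting (n0,n1 counters then n0*n1) by a literal pairwise-comparison algorithm: for each SNP it extracts the column and scans all unordered haplotype pairs, counting differing pairs directly as pi and detecting singletons as 'allele present but no equal pair', so no allele counts are ever computed.
import Mathlib
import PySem

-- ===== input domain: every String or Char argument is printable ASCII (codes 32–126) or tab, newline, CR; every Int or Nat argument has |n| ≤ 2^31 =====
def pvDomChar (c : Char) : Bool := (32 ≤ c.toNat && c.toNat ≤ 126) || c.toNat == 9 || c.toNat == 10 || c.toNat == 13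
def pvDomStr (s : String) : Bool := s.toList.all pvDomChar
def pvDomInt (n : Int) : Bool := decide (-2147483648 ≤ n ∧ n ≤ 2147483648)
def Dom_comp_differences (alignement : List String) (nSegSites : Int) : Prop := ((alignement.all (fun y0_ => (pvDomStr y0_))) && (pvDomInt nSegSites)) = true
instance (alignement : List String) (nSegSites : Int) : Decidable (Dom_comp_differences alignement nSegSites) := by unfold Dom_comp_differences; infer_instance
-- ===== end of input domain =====

-- B replaces A's per-SNP allele counting by a direct pairwise-comparison algorithm
-- (scan all unordered haplotype pairs per column); alternative decomposition, not faster.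

-- ===== PORT A =====
-- inner loop: 'for j in alignement: if j[i]=='0': n0+=1; if j[i]=='1': n1+=1'
def aInner (i : Int) (nn : Int × Int) (j : String) : Int × Int :=
  let n0 := if PySem.Str.pyGet? j i = some '0' then nn.1 + 1 else nn.1
  let n1 := if PySem.Str.pyGet? j i = some '1' then nn.2 + 1 else nn.2
  (n0, n1)

-- body of 'for i in range(nSegSites)', state = (res["kxy_allSNP"], res["kxy_singletons"])
def aOuter (alignement : List String) (res : List Int × List Int) (i : Int) : List Int × List Int :=
  let nn := alignement.foldl (aInner i) (0, 0)
  let pi := nn.1 * nn.2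
  (res.1 ++ [pi], if nn.1 = 1 ∨ nn.2 = 1 then res.2 ++ [pi] else res.2)

def comp_differences (alignement : List String) (nSegSites : Int) : List (String × List Int) :=
  let r := (PySem.List.pyRange 0 nSegSites 1).foldl (aOuter alignement) ([], [])
  [("kxy_allSNP", r.1), ("kxy_singletons", r.2)]

-- ===== PORT B =====
-- inner 'for b in rest: if …: pi += 1 elif …: pair00 = True elif …: pair11 = True'
def bPairStep (a : Option Char) (st : Int × Bool × Bool) (b : Option Char) : Int × Bool × Bool :=
  if (a = some '0' ∧ b = some '1') ∨ (a = some '1' ∧ b = some '0') then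
    (st.1 + 1, st.2.1, st.2.2)
  else if a = some '0' ∧ b = some '0' then (st.1, true, st.2.2)
  else if a = some '1' ∧ b = some '1' then (st.1, st.2.1, true)
  else st

-- 'while rest: a = rest[0]; rest = rest[1:]; for b in rest: …'
def bPairs : List (Option Char) → Int × Bool × Bool → Int × Bool × Bool
  | [], st => st
  | a :: rest, st => bPairs rest (rest.foldl (bPairStep a) st)

-- body of 'for i in range(nSegSites)'
def bOuter (alignement : List String) (res : List Int × List Int) (i : Int) : List Int × List Int :=
  let chars := alignement.map (fun row => PySem.Str.pyGet? row i)
  let st := bPairs chars (0, false, false)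
  let pi := st.1
  (res.1 ++ [pi],
   if (chars.contains (some '0') && !st.2.1) || (chars.contains (some '1') && !st.2.2)
   then res.2 ++ [pi] else res.2)

def comp_differences_alt (alignement : List String) (nSegSites : Int) : List (String × List Int) :=
  let r := (PySem.List.pyRange 0 nSegSites 1).foldl (bOuter alignement) ([], [])
  [("kxy_allSNP", r.1), ("kxy_singletons", r.2)]

-- ===== PRECONDITION & SPEC =====
-- Pre_ excludes exactly the inputs on which Python A raises IndexError: nSegSites positive
-- and some row shorter than nSegSites (B raises there too).
def Pre_comp_differences (alignement : List String) (nSegSites : Int) : Prop :=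
  0 < nSegSites → ∀ s ∈ alignement, nSegSites ≤ PySem.Str.len s
instance (alignement : List String) (nSegSites : Int) : Decidable (Pre_comp_differences alignement nSegSites) := by unfold Pre_comp_differences; infer_instance

def pvWitness_comp_differences : List String × Int := (["01", "10", "00"], 2)

def Spec_comp_differences (alignement : List String) (nSegSites : Int) (out : List (String × List Int)) : Prop := out = comp_differences_alt alignement nSegSites
instance (alignement : List String) (nSegSites : Int) (out : List (String × List Int)) : Decidable (Spec_comp_differences alignement nSegSites out) := by unfold Spec_comp_differences; infer_instance

-- ===== CLAIM (what is proved, stated in full; the proofs are below) =====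
def Claim_equal_comp_differences : Prop := ∀ (alignement : List String) (nSegSites : Int), Dom_comp_differences alignement nSegSites → Pre_comp_differences alignement nSegSites → Spec_comp_differences alignement nSegSites (comp_differences alignement nSegSites)

-- ===== LEMMAS AND PROOFS =====

-- column-wise 0/1 indicators
def d0 (row : String) (i : Int) : Int := if PySem.Str.pyGet? row i = some '0' then 1 else 0
def d1 (row : String) (i : Int) : Int := if PySem.Str.pyGet? row i = some '1' then 1 else 0

-- A's inner column scan is the pair of indicator sums over the rows
lemma colA (al : List String) (i : Int) (a b : Int) :
    al.foldl (aInner i) (a, b)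
      = (a + (al.map (fun j => d0 j i)).sum, b + (al.map (fun j => d1 j i)).sum) := by
  induction al generalizing a b with
  | nil => simp
  | cons r t ih =>
    have h : aInner i (a, b) r = (a + d0 r i, b + d1 r i) := by
      by_cases c0 : PySem.List.pyGet? r.toList i = some '0' <;>
        by_cases c1 : PySem.List.pyGet? r.toList i = some '1' <;>
          simp [aInner, d0, d1, c0, c1]
    rw [List.foldl_cons, h, ih]
    simp only [List.map_cons, List.sum_cons, Prod.mk.injEq]
    constructor <;> ring

-- indicator sums are counts of the mapped column
lemma sum_d0 (al : List String) (i : Int) :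
    (al.map (fun j => d0 j i)).sum
      = ((al.map (fun row => PySem.Str.pyGet? row i)).count (some '0') : Int) := by
  induction al with
  | nil => simp
  | cons r t ih =>
    rw [List.map_cons, List.sum_cons, List.map_cons, List.count_cons, ih]
    by_cases h : PySem.Str.pyGet? r i = some '0'
    · rw [show d0 r i = 1 from if_pos h, if_pos (beq_iff_eq.mpr h)]; push_cast; ring
    · rw [show d0 r i = 0 from if_neg h, if_neg (fun e => h (beq_iff_eq.mp e))]
      push_cast; ring

lemma sum_d1 (al : List String) (i : Int) :
    (al.map (fun j => d1 j i)).sum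
      = ((al.map (fun row => PySem.Str.pyGet? row i)).count (some '1') : Int) := by
  induction al with
  | nil => simp
  | cons r t ih =>
    rw [List.map_cons, List.sum_cons, List.map_cons, List.count_cons, ih]
    by_cases h : PySem.Str.pyGet? r i = some '1'
    · rw [show d1 r i = 1 from if_pos h, if_pos (beq_iff_eq.mpr h)]; push_cast; ring
    · rw [show d1 r i = 0 from if_neg h, if_neg (fun e => h (beq_iff_eq.mp e))]
      push_cast; ring

-- B's inner pass over the tail against a fixed head
lemma inner_pairs (a : Option Char) (rest : List (Option Char)) (p : Int) (s0 s1 : Bool) :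
    rest.foldl (bPairStep a) (p, s0, s1)
      = (p + (if a = some '0' then (rest.count (some '1') : Int)
              else if a = some '1' then (rest.count (some '0') : Int) else 0),
         s0 || (decide (a = some '0') && decide (1 ≤ rest.count (some '0'))),
         s1 || (decide (a = some '1') && decide (1 ≤ rest.count (some '1')))) := by
  induction rest generalizing p s0 s1 with
  | nil => by_cases h0 : a = some '0' <;> by_cases h1 : a = some '1' <;> simp [h0, h1]
  | cons b t ih =>
    rw [List.foldl_cons, ih]
    by_cases h0 : a = some '0' <;> by_cases h1 : a = some '1' <;>
      by_cases g0 : b = some '0' <;> by_cases g1 : b = some '1' <;>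
        simp_all [bPairStep, List.count_cons] <;>
          (try constructor) <;> push_cast <;> ring_nf <;> omega

-- the whole pairwise scan: pi is the product of the counts, the flags detect count ≥ 2
lemma pairs_eq (os : List (Option Char)) (p : Int) (s0 s1 : Bool) :
    bPairs os (p, s0, s1)
      = (p + (os.count (some '0') : Int) * (os.count (some '1') : Int),
         s0 || decide (2 ≤ os.count (some '0')),
         s1 || decide (2 ≤ os.count (some '1'))) := by
  induction os generalizing p s0 s1 with
  | nil => simp [bPairs]
  | cons a t ih =>
    rw [bPairs, inner_pairs, ih]
    simp only [List.count_cons, beq_iff_eq, Prod.mk.injEq]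
    by_cases h0 : a = some '0'
    · subst h0
      simp
      refine ⟨by push_cast; ring, ?_⟩
      intro h
      exact Or.inr (List.count_pos_iff.mp (by omega))
    · by_cases h1 : a = some '1'
      · subst h1
        simp
        refine ⟨by push_cast; ring, ?_⟩
        intro h
        exact Or.inr (List.count_pos_iff.mp (by omega))
      · simp [h0, h1]

-- the two loop bodies agree on every state and every index
lemma step_eq (al : List String) (res : List Int × List Int) (i : Int) :
    aOuter al res i = bOuter al res i := by
  have hA := colA al i 0 0
  simp only [aOuter, bOuter, hA, sum_d0 al i, sum_d1 al i,
    pairs_eq (al.map (fun row => PySem.Str.pyGet? row i)) 0 false false]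
  set c0 := (al.map (fun row => PySem.Str.pyGet? row i)).count (some '0') with hc0
  set c1 := (al.map (fun row => PySem.Str.pyGet? row i)).count (some '1') with hc1
  have m0 : (al.map (fun row => PySem.Str.pyGet? row i)).contains (some '0')
      = decide (1 ≤ c0) := by
    rw [List.contains_eq_mem, decide_eq_decide, ← List.count_pos_iff, hc0]
    omega
  have m1 : (al.map (fun row => PySem.Str.pyGet? row i)).contains (some '1')
      = decide (1 ≤ c1) := by
    rw [List.contains_eq_mem, decide_eq_decide, ← List.count_pos_iff, hc1]
    omega
  have cond : ((0:Int) + c0 = 1 ∨ (0:Int) + c1 = 1)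
      ↔ ((decide (1 ≤ c0) && !decide (2 ≤ c0)) || (decide (1 ≤ c1) && !decide (2 ≤ c1)))
          = true := by
    simp; omega
  rw [m0, m1]
  simp only [zero_add, Bool.false_or]
  split_ifs with h1 h2 h2
  · rfl
  · exact absurd (by simpa using cond.mp (by simpa using h1)) h2
  · exact absurd (by simpa using cond.mpr (by simpa using h2)) h1
  · rfl

-- ===== VERDICT (by name: the statement is the Claim_ definition above) =====
theorem comp_differences_spec : Claim_equal_comp_differences := by
  intro al ns _ _
  show comp_differences al ns = comp_differences_alt al ns
  simp only [comp_differences, comp_differences_alt]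
  have h : (PySem.List.pyRange 0 ns 1).foldl (aOuter al) ([], [])
      = (PySem.List.pyRange 0 ns 1).foldl (bOuter al) ([], []) := by
    apply PySem.List.foldl_congr_mem
    intro acc x _
    exact step_eq al acc x
  rw [h]
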